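-- pv_equiv track=rewrite | github.com/xiaobingling93-pixel/Ascend-msprobe | python/msprobe/msaccucmp/pytorch_cmp/compare_pytorch.py | _get_item_location
-- ===== SOURCE A (Python) =====
-- def _get_item_location(row: list) -> list:
--     cos_index = 0
--     my_dump_index = 0
--     golden_index = 0
--     for (index, item) in enumerate(row):
--         if item == "CosineSimilarity":
--             cos_index = index
--         elif item == "MyDumpDataPath":
--             my_dump_index = index
--         elif item == "GoldenDumpDataPath":
--             golden_index = index
--     return [cos_index, my_dump_index, golden_index]
-- ===== SOURCE B (Python) =====
-- def _get_item_location(row: list) -> list: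
--     rev = list(reversed(row))
--     n = len(row)
--
--     def last_index(header):
--         try:
--             return n - 1 - rev.index(header)
--         except ValueError:
--             return 0
--
--     return [last_index("CosineSimilarity"),
--             last_index("MyDumpDataPath"),
--             last_index("GoldenDumpDataPath")]
-- ===== Notes on version B (the rewrite author's own statement) =====
-- stated objective: alternative
-- what changed: Replaces A's single forward scan with three branching accumulators by a reverse-then-search strategy: reverse the list once and run three independent .index searches on the reversed list (first hit from the back = last occurrence), converting each found position via n-1-pos and defaulting to 0 on ValueError.
import Mathlib
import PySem

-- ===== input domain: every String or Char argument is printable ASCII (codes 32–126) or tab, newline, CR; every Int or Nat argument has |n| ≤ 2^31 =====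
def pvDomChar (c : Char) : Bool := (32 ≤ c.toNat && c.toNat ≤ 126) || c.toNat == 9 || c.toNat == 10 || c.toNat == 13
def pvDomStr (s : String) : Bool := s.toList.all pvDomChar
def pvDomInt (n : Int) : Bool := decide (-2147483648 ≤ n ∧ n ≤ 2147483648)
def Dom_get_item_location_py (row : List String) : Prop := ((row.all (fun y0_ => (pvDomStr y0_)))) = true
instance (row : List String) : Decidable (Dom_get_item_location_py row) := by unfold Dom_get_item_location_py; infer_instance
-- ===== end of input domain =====

-- B replaces A's forward scan with three accumulators by reversing the list once and
-- running three independent back-to-front index searches (alternative decomposition).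

-- ===== PORT A =====
def get_item_location_py (row : List String) : List Int :=
  let st := (PySem.List.enumerate row 0).foldl
    (fun (st : Int × Int × Int) (p : Int × String) =>
      if p.2 == "CosineSimilarity" then (p.1, st.2.1, st.2.2)
      else if p.2 == "MyDumpDataPath" then (st.1, p.1, st.2.2)
      else if p.2 == "GoldenDumpDataPath" then (st.1, st.2.1, p.1)
      else st) (0, 0, 0)
  [st.1, st.2.1, st.2.2]

-- ===== PORT B =====
-- last_index: rev.index raises ValueError when absent → PySem.List.index? returns none there.
def pvLastIndex (rev : List String) (n : Int) (header : String) : Int :=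
  match PySem.List.index? rev header with
  | some k => n - 1 - (k : Int)
  | none => 0

def get_item_location_py_alt (row : List String) : List Int :=
  let rev := row.reverse
  let n : Int := row.length
  [pvLastIndex rev n "CosineSimilarity",
   pvLastIndex rev n "MyDumpDataPath",
   pvLastIndex rev n "GoldenDumpDataPath"]

-- ===== PRECONDITION & SPEC =====
def Spec_get_item_location_py (row : List String) (out : List Int) : Prop := out = get_item_location_py_alt row
instance (row : List String) (out : List Int) : Decidable (Spec_get_item_location_py row out) := by unfold Spec_get_item_location_py; infer_instance

-- ===== CLAIM (what is proved, stated in full; the proofs are below) =====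
def Claim_equal_get_item_location_py : Prop := ∀ (row : List String), Dom_get_item_location_py row → Spec_get_item_location_py row (get_item_location_py row)

-- ===== LEMMAS AND PROOFS =====
theorem pvLastIndex_cons (rev : List String) (n : Int) (x header : String) :
    pvLastIndex (x :: rev) (n + 1) header =
      if x = header then n else pvLastIndex rev n header := by
  by_cases h : x = header
  · subst h
    rw [if_pos rfl, pvLastIndex, PySem.List.index?_cons_self]
    push_cast; ring
  · rw [if_neg h, pvLastIndex, PySem.List.index?_cons_of_ne rev h]
    cases hk : PySem.List.index? rev header with
    | none => simp only [hk, Option.map_none, pvLastIndex]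
    | some k => simp only [hk, Option.map_some, pvLastIndex]; push_cast; ring

theorem get_item_location_fold_eq (row : List String) :
    (PySem.List.enumerate row 0).foldl
      (fun (st : Int × Int × Int) (p : Int × String) =>
        if p.2 == "CosineSimilarity" then (p.1, st.2.1, st.2.2)
        else if p.2 == "MyDumpDataPath" then (st.1, p.1, st.2.2)
        else if p.2 == "GoldenDumpDataPath" then (st.1, st.2.1, p.1)
        else st) (0, 0, 0)
    = (pvLastIndex row.reverse row.length "CosineSimilarity",
       pvLastIndex row.reverse row.length "MyDumpDataPath",
       pvLastIndex row.reverse row.length "GoldenDumpDataPath") := by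
  induction row using List.reverseRecOn with
  | nil => simp [pvLastIndex, PySem.List.index?]
  | append_singleton row x ih =>
    rw [PySem.List.enumerate_append, List.foldl_append, ih]
    have hlen : ((row ++ [x]).length : Int) = (row.length : Int) + 1 := by
      simp
    simp only [List.reverse_append, List.reverse_singleton, List.singleton_append, hlen,
      pvLastIndex_cons, PySem.List.enumerate_cons, PySem.List.enumerate_nil,
      List.foldl_cons, List.foldl_nil]
    by_cases h1 : x = "CosineSimilarity"
    · simp [h1]
    · by_cases h2 : x = "MyDumpDataPath"
      · simp [h2]
      · by_cases h3 : x = "GoldenDumpDataPath"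
        · simp [h3]
        · simp [h1, h2, h3]

-- ===== VERDICT (by name: the statement is the Claim_ definition above) =====
theorem get_item_location_py_spec : Claim_equal_get_item_location_py := by
  intro row _
  unfold Spec_get_item_location_py get_item_location_py get_item_location_py_alt
  rw [get_item_location_fold_eq]
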